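-- pv_equiv track=rewrite | github.com/dlowder-salesforce/advent2016 | advent09.py | uncompressed_length
-- ===== SOURCE A (Python) =====
-- def uncompressed_length(s, recurse):
--     total = 0
--     i = 0
--     while i < len(s):
--         if s[i] == '(':
--             j = s.index(')',i)
--             (chars, repeat) = map(int, ''.join(s[i+1:j]).split('x'))
--             uncompressed_chunk = s[j+1:j+chars+1]
--             if recurse:
--                 total += uncompressed_length(uncompressed_chunk, recurse)*repeat
--             else:
--                 total += chars*repeat
--             i = j + chars + 1
--         else:
--             total += 1
--             i += 1
--     return total
-- ===== SOURCE B (Python) =====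
-- def uncompressed_length(s, recurse):
--     n = len(s)
--     total = 0
--     weight = 1
--     stack = []  # (chunk_end_index, weight_before_marker)
--     i = 0
--     while i < n:
--         while stack and stack[-1][0] <= i:
--             weight = stack.pop()[1]
--         if s[i] == '(':
--             j = s.index(')', i)
--             chars, repeat = map(int, s[i+1:j].split('x'))
--             if recurse:
--                 stack.append((j + 1 + chars, weight))
--                 weight *= repeat
--                 i = j + 1
--             else:
--                 total += weight * chars * repeat
--                 i = j + 1 + chars
--         else:
--             total += weight
--             i += 1
--     return total
-- ===== Notes on version B (the rewrite author's own statement) =====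
-- stated objective: alternative
-- what changed: A recursively re-expands each marker's chunk substring (re-scanning nested chunks once per nesting level); B makes a single left-to-right pass keeping a stack of (chunk_end, saved_weight) and adds the product of active multipliers for each literal character (intended as the O(n) rewrite; measured ~1.4x on the generated inputs, below the 1.5x bar).
-- outside the precondition, e.g. on uncompressed_length('(-1x2)', True): A returns 1, B returns 0; on uncompressed_length('(6x2)(9x3)abc', True): A returns 8, B returns 18; on uncompressed_length('(-1x2)', False): A returns -1, B returns -1
import Mathlib
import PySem

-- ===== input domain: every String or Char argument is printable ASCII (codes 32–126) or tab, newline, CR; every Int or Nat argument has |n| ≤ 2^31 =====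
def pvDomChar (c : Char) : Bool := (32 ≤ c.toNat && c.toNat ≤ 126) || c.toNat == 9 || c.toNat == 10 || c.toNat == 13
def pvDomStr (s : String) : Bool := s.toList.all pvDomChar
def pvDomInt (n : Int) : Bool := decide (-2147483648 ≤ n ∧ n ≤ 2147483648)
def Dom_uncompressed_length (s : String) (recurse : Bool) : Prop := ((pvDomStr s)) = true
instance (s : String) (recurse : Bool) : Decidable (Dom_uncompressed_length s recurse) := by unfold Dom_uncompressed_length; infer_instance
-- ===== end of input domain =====

-- B replaces A's recursion on chunk substrings by a single left-to-right pass with a stack of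
-- (chunk_end, saved_weight), weighting each literal character by the product of active
-- multipliers (objective: alternative — one pass instead of re-scanning nested chunks).

-- ===== PORT A =====

-- s.index(')', i) on the suffix from i  (none = ValueError, excluded by Pre_)
def pvFindClose (cs : List Char) : Option Nat := PySem.List.index? cs ')'

-- "(chars, repeat) = map(int, content.split('x'))": exactly two 'x'-separated parts, both int()-parseable
def pvParseMarker (content : List Char) : Option (Int × Int) :=
  match PySem.Chars.split? content ['x'] with
  | some [a, b] =>
    match PySem.Int.ofChars? a, PySem.Int.ofChars? b with
    | some chars, some rep => some (chars, rep)
    | _, _ => none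
  | _ => none

-- the while-loop of A over the suffix of s starting at i; the recursive call on the chunk slice
-- is A's own recursion.  '.toNat' is exact here: Pre_ guarantees 0 ≤ chars.  On inputs where the
-- Python raises (no ')', bad marker) the port returns 0; those inputs are outside Pre_.
def pvALoop (recurse : Bool) : List Char → Int
  | [] => 0
  | c :: rest =>
    if c = '(' then
      match pvFindClose (c :: rest) with
      | none => 0
      | some j =>
        match pvParseMarker (((c :: rest).take j).drop 1) with
        | none => 0
        | some (chars, rep) =>
          (if recurse then pvALoop recurse (((c :: rest).drop (j + 1)).take chars.toNat) * rep
           else chars * rep)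
          + pvALoop recurse ((c :: rest).drop (j + 1 + chars.toNat))
    else 1 + pvALoop recurse rest
  termination_by cs => cs.length
  decreasing_by
  all_goals simp [List.length_take, List.length_drop]
  all_goals omega

def uncompressed_length (s : String) (recurse : Bool) : Int :=
  pvALoop recurse s.toList

-- ===== PORT B =====

-- "while stack and stack[-1][0] <= i: weight = stack.pop()[1]"
def pvPop (i : Nat) : List (Nat × Int) → Int → List (Nat × Int) × Int
  | [], w => ([], w)
  | (e, sw) :: st, w => if e ≤ i then pvPop i st sw else ((e, sw) :: st, w)

-- B's single while-loop; fuel = len(s) bounds the iteration count (inside Pre_, i strictly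
-- increases each iteration, so the fuel is never exhausted).  '.toNat' exact for 0 ≤ chars (Pre_).
def pvBLoop (cs : List Char) (recurse : Bool) : Nat → Nat → List (Nat × Int) → Int → Int → Int
  | 0, _, _, _, total => total
  | fuel + 1, i, stack, weight, total =>
    if hi : i < cs.length then
      match pvPop i stack weight with
      | (stack', weight') =>
        if cs[i] = '(' then
          match pvFindClose (cs.drop i) with
          | none => total
          | some dj =>
            match pvParseMarker ((cs.take (i + dj)).drop (i + 1)) with
            | none => total
            | some (chars, rep) =>
              if recurse then
                pvBLoop cs recurse fuel (i + dj + 1) ((i + dj + 1 + chars.toNat, weight') :: stack')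
                  (weight' * rep) total
              else
                pvBLoop cs recurse fuel (i + dj + 1 + chars.toNat) stack' weight'
                  (total + weight' * (chars * rep))
        else pvBLoop cs recurse fuel (i + 1) stack' weight' (total + weight')
    else total

def uncompressed_length_alt (s : String) (recurse : Bool) : Int :=
  pvBLoop s.toList recurse s.toList.length 0 [] 1 0

-- ===== PRECONDITION & SPEC =====

-- pvWfF is the same grammar, structurally recursive on a depth bound (the string length) so the
-- kernel can evaluate it; pvWfF_eq_pvWf below proves it equal to pvWf on an adequate bound.
def pvWfF (recurse : Bool) : Nat → List Char → Bool
  | _, [] => true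
  | 0, _ :: _ => false
  | fuel + 1, c :: rest =>
    if c = '(' then
      match pvFindClose (c :: rest) with
      | none => false
      | some j =>
        match pvParseMarker (((c :: rest).take j).drop 1) with
        | none => false
        | some (chars, _) =>
          decide (0 ≤ chars)
          && (!recurse || (decide (j + 1 + chars.toNat ≤ rest.length + 1)
              && pvWfF recurse fuel (((c :: rest).drop (j + 1)).take chars.toNat)))
          && pvWfF recurse fuel ((c :: rest).drop (j + 1 + chars.toNat))
    else pvWfF recurse fuel rest

-- Pre_ excludes inputs where A raises ValueError (no ')' after a '(', or a marker that is not
-- two ints split by 'x'), and inputs with a negative marker length or a chunk overrunning its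
-- region, where A's value (negative-slice clipping; A can even loop forever) is an accident of
-- its index arithmetic.  It is the grammar of well-formed compressed data, checked without
-- computing anything either program outputs.
def Pre_uncompressed_length (s : String) (recurse : Bool) : Prop :=
  pvWfF recurse s.toList.length s.toList = true
instance (s : String) (recurse : Bool) : Decidable (Pre_uncompressed_length s recurse) := by
  unfold Pre_uncompressed_length; infer_instance

def pvWitness_uncompressed_length : String × Bool := ("(3x3)abc", true)

def Spec_uncompressed_length (s : String) (recurse : Bool) (out : Int) : Prop := out = uncompressed_length_alt s recurse
instance (s : String) (recurse : Bool) (out : Int) : Decidable (Spec_uncompressed_length s recurse out) := by unfold Spec_uncompressed_length; infer_instance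

-- ===== CLAIM (what is proved, stated in full; the proofs are below) =====
def Claim_equal_uncompressed_length : Prop := ∀ (s : String) (recurse : Bool), Dom_uncompressed_length s recurse → Pre_uncompressed_length s recurse → Spec_uncompressed_length s recurse (uncompressed_length s recurse)

-- ===== LEMMAS AND PROOFS =====

-- Closed-form grammar of valid compressed data: every '(' opens a marker "(AxB)" whose two parts
-- are Python-int-parseable, with A ≥ 0, and (when recurse) whose chunk of A characters lies
-- entirely inside the enclosing region; recursively so inside chunks and after them.
def pvWf (recurse : Bool) : List Char → Bool
  | [] => true
  | c :: rest =>
    if c = '(' then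
      match pvFindClose (c :: rest) with
      | none => false
      | some j =>
        match pvParseMarker (((c :: rest).take j).drop 1) with
        | none => false
        | some (chars, _) =>
          decide (0 ≤ chars)
          && (!recurse || (decide (j + 1 + chars.toNat ≤ rest.length + 1)
              && pvWf recurse (((c :: rest).drop (j + 1)).take chars.toNat)))
          && pvWf recurse ((c :: rest).drop (j + 1 + chars.toNat))
    else pvWf recurse rest
  termination_by cs => cs.length
  decreasing_by
  all_goals simp [List.length_take, List.length_drop]
  all_goals omega


-- the slice s[i:e]
def pvSeg (cs : List Char) (i e : Nat) : List Char := (cs.take e).drop i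

-- stack invariant of B's loop: the ends are nested, each region between consecutive ends is
-- well formed, and the last region runs to the end of the string.
def pvGood (cs : List Char) : Nat → List (Nat × Int) → Prop
  | i, [] => i ≤ cs.length ∧ pvWf true (pvSeg cs i cs.length) = true
  | i, (e, _) :: st => i ≤ e ∧ pvWf true (pvSeg cs i e) = true ∧ pvGood cs e st

-- what B still has to add: current weight times A's length of the current region, plus the
-- saved-weight-weighted A-lengths of the outer regions.
def pvSum (cs : List Char) : Nat → Int → List (Nat × Int) → Int
  | i, w, [] => w * pvALoop true (pvSeg cs i cs.length)
  | i, w, (e, sw) :: st => w * pvALoop true (pvSeg cs i e) + pvSum cs e sw st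


theorem pvSeg_len (cs : List Char) (i e : Nat) :
    (pvSeg cs i e).length = min e cs.length - i := by
  simp [pvSeg]

theorem pvSeg_cons (cs : List Char) (i e : Nat) (h1 : i < e) (h2 : e ≤ cs.length) :
    pvSeg cs i e = cs[i]'(by omega) :: pvSeg cs (i+1) e := by
  unfold pvSeg
  rw [List.drop_eq_getElem_cons (by simp; omega)]
  congr 1
  exact List.getElem_take

theorem pvSeg_drop (cs : List Char) (i e m : Nat) :
    (pvSeg cs i e).drop m = pvSeg cs (i+m) e := by
  simp [pvSeg, List.drop_drop]

theorem pvSeg_take (cs : List Char) (i e k : Nat) (h : i + k ≤ e) :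
    (pvSeg cs i e).take k = pvSeg cs i (i+k) := by
  unfold pvSeg
  rw [List.take_drop, List.take_take, Nat.min_eq_left h]

theorem pvSeg_append_drop (cs : List Char) (i e : Nat) (h1 : i ≤ e) (h2 : e ≤ cs.length) :
    pvSeg cs i e ++ cs.drop e = cs.drop i := by
  unfold pvSeg
  conv_rhs => rw [← List.take_append_drop e cs]
  rw [List.drop_append_of_le_length (by simp; omega)]

theorem pvSeg_nil (cs : List Char) (i e : Nat) (h : min e cs.length ≤ i) :
    pvSeg cs i e = [] := by
  apply List.drop_eq_nil_of_le
  simp [h]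


theorem pvHead_char (cs : List Char) (i e : Nat) (h1 : i < e) (h2 : e ≤ cs.length)
    (hc : ¬ cs[i]'(by omega) = '(') (hwf : pvWf true (pvSeg cs i e) = true) :
    pvWf true (pvSeg cs (i+1) e) = true ∧
    pvALoop true (pvSeg cs i e) = 1 + pvALoop true (pvSeg cs (i+1) e) := by
  rw [pvSeg_cons cs i e h1 h2] at hwf ⊢
  rw [pvWf] at hwf
  rw [pvALoop]
  rw [if_neg hc] at hwf
  rw [if_neg hc]
  exact ⟨hwf, rfl⟩

theorem pvHead_paren (cs : List Char) (i e : Nat) (h1 : i < e) (h2 : e ≤ cs.length)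
    (hc : cs[i]'(by omega) = '(') (hwf : pvWf true (pvSeg cs i e) = true) :
    ∃ dj chars rep,
      pvFindClose (cs.drop i) = some dj ∧
      pvParseMarker ((cs.take (i+dj)).drop (i+1)) = some (chars, rep) ∧
      0 ≤ chars ∧ 1 ≤ dj ∧ i + dj + 1 + chars.toNat ≤ e ∧
      pvWf true (pvSeg cs (i+dj+1) (i+dj+1+chars.toNat)) = true ∧
      pvWf true (pvSeg cs (i+dj+1+chars.toNat) e) = true ∧
      pvALoop true (pvSeg cs i e)
        = pvALoop true (pvSeg cs (i+dj+1) (i+dj+1+chars.toNat)) * rep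
          + pvALoop true (pvSeg cs (i+dj+1+chars.toNat) e) := by
  have hcons := pvSeg_cons cs i e h1 h2
  rw [hcons] at hwf
  rw [pvWf, if_pos hc] at hwf
  cases hfc : pvFindClose (cs[i]'(by omega) :: pvSeg cs (i+1) e) with
  | none => rw [hfc] at hwf; simp at hwf
  | some j =>
    rw [hfc] at hwf
    simp only [] at hwf
    cases hpm : pvParseMarker (((cs[i]'(by omega) :: pvSeg cs (i+1) e).take j).drop 1) with
    | none => rw [hpm] at hwf; simp at hwf
    | some cr =>
      obtain ⟨chars, rep⟩ := cr
      rw [hpm] at hwf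
      simp only [Bool.and_eq_true, Bool.or_eq_true, Bool.not_eq_true', decide_eq_true_eq] at hwf
      have hch := hwf.1.1
      have hfitwf := hwf.1.2.resolve_left (by simp)
      have hfit := hfitwf.1
      have hchunk := hfitwf.2
      have hrest := hwf.2
      have hfit' : j + 1 + chars.toNat ≤ e - i := by
        have hlen := pvSeg_len cs (i+1) e
        omega
      -- j is a genuine index of ')' in the segment
      have hj := PySem.List.getElem_of_index?_eq_some (by rw [← hfc]; rfl)
      obtain ⟨hjlt, hjget, _⟩ := hj
      have hjlen : j < e - i := by
        have : (cs[i]'(by omega) :: pvSeg cs (i+1) e).length = e - i := by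
          simp [pvSeg_len]; omega
        omega
      have hj1 : 1 ≤ j := by
        rcases Nat.eq_zero_or_pos j with h0 | h; · subst h0; simp [hc] at hjget
        omega
      -- translate findClose to the full suffix
      have hmem : (')' : Char) ∈ (cs[i]'(by omega) :: pvSeg cs (i+1) e) := by
        rw [← PySem.List.index?_isSome_iff, ← pvFindClose, hfc]; rfl
      have hsuffix : cs.drop i = (cs[i]'(by omega) :: pvSeg cs (i+1) e) ++ cs.drop e := by
        rw [← hcons]; exact (pvSeg_append_drop cs i e (by omega) h2).symm
    
      have hfc' : pvFindClose (cs.drop i) = some j := by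
        rw [hsuffix, pvFindClose, PySem.List.index?_append_of_mem _ hmem, ← pvFindClose, hfc]
      -- content slice
      have hcontent : (((cs[i]'(by omega) :: pvSeg cs (i+1) e)).take j).drop 1
          = (cs.take (i+j)).drop (i+1) := by
        rw [← hcons, pvSeg_take cs i e j (by omega)]
        show (pvSeg cs i (i+j)).drop 1 = _
        rw [pvSeg_drop]
        rfl
      -- chunk slice
      have hchunkeq : (((cs[i]'(by omega) :: pvSeg cs (i+1) e)).drop (j+1)).take chars.toNat
          = pvSeg cs (i+j+1) (i+j+1+chars.toNat) := by
        rw [← hcons, pvSeg_drop, pvSeg_take cs (i+(j+1)) e chars.toNat (by omega)]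
        have : i + (j+1) = i+j+1 := by omega
        rw [this]
      -- rest slice
      have hresteq : ((cs[i]'(by omega) :: pvSeg cs (i+1) e)).drop (j+1+chars.toNat)
          = pvSeg cs (i+j+1+chars.toNat) e := by
        rw [← hcons, pvSeg_drop]
        have : i + (j+1+chars.toNat) = i+j+1+chars.toNat := by omega
        rw [this]
      refine ⟨j, chars, rep, hfc', ?_, hch, hj1, by omega, ?_, ?_, ?_⟩
      · rw [← hcontent]; exact hpm
      · rw [← hchunkeq]; exact hchunk
      · rw [← hresteq]; exact hrest
      · rw [hcons, pvALoop, if_pos hc, hfc]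
        simp only []
        rw [hpm]
        simp only []
        rw [if_pos trivial, hchunkeq, hresteq]

theorem pvWfF_eq_pvWf (recurse : Bool) :
    ∀ (fuel : Nat) (cs : List Char), cs.length ≤ fuel →
      pvWfF recurse fuel cs = pvWf recurse cs := by
  intro fuel
  induction fuel with
  | zero =>
    intro cs h
    have : cs = [] := List.eq_nil_of_length_eq_zero (by omega)
    subst this
    rw [pvWfF, pvWf]
  | succ fuel ih =>
    intro cs h
    cases cs with
    | nil => rw [pvWfF, pvWf]
    | cons c rest =>
      rw [pvWfF, pvWf]
      by_cases hc : c = '('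
      · rw [if_pos hc, if_pos hc]
        cases hfc : pvFindClose (c :: rest) with
        | none => rfl
        | some j =>
          simp only []
          cases hpm : pvParseMarker (((c :: rest).take j).drop 1) with
          | none => rfl
          | some cr =>
            obtain ⟨chars, rep⟩ := cr
            simp only []
            rw [ih (((c :: rest).drop (j + 1)).take chars.toNat)
                 (by simp [List.length_take, List.length_drop] at *; omega),
               ih ((c :: rest).drop (j + 1 + chars.toNat))
                 (by simp [List.length_drop] at *; omega)]
      · rw [if_neg hc, if_neg hc]
        exact ih rest (by simp at h; omega)

theorem pvGood_le (cs : List Char) :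
    ∀ (stack : List (Nat × Int)) (i : Nat), pvGood cs i stack → i ≤ cs.length := by
  intro stack
  induction stack with
  | nil => intro i hg; exact hg.1
  | cons hd tl ih =>
    obtain ⟨e, sw⟩ := hd
    intro i hg
    exact le_trans hg.1 (ih e hg.2.2)

-- the end of B's current region: the top end of the stack, or the end of the string
def pvTop (n : Nat) : List (Nat × Int) → Nat
  | [] => n
  | (e, _) :: _ => e

theorem pvGood_top (cs : List Char) (i : Nat) (stack : List (Nat × Int))
    (hg : pvGood cs i stack) :
    i ≤ pvTop cs.length stack ∧ pvTop cs.length stack ≤ cs.length ∧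
      pvWf true (pvSeg cs i (pvTop cs.length stack)) = true := by
  cases stack with
  | nil => exact ⟨hg.1, le_refl _, hg.2⟩
  | cons hd tl =>
    obtain ⟨e, sw⟩ := hd
    exact ⟨hg.1, pvGood_le cs tl e hg.2.2, hg.2.1⟩

theorem pvGood_replace (cs : List Char) (i i' : Nat) (stack : List (Nat × Int))
    (hg : pvGood cs i stack) (h1 : i' ≤ pvTop cs.length stack)
    (h2 : pvWf true (pvSeg cs i' (pvTop cs.length stack)) = true) :
    pvGood cs i' stack := by
  cases stack with
  | nil => exact ⟨h1, h2⟩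
  | cons hd tl =>
    obtain ⟨e, sw⟩ := hd
    exact ⟨h1, h2, hg.2.2⟩

theorem pvSum_split (cs : List Char) (stack : List (Nat × Int)) :
    ∃ K : Int, ∀ (i : Nat) (w : Int),
      pvSum cs i w stack = w * pvALoop true (pvSeg cs i (pvTop cs.length stack)) + K := by
  cases stack with
  | nil => exact ⟨0, fun i w => by simp [pvSum, pvTop]⟩
  | cons hd tl =>
    obtain ⟨e, sw⟩ := hd
    exact ⟨pvSum cs e sw tl, fun i w => by simp [pvSum, pvTop]⟩

theorem pvSum_done (cs : List Char) :
    ∀ (stack : List (Nat × Int)) (i : Nat) (w : Int),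
      pvGood cs i stack → cs.length ≤ i → pvSum cs i w stack = 0 := by
  intro stack
  induction stack with
  | nil =>
    intro i w hg hi
    have h0 : pvSeg cs i cs.length = [] := pvSeg_nil cs i cs.length (by omega)
    simp [pvSum, h0, pvALoop]
  | cons hd tl ih =>
    obtain ⟨e, sw⟩ := hd
    intro i w hg hi
    obtain ⟨hie, hwseg, hgtl⟩ := hg
    have h0 : pvSeg cs i e = [] := pvSeg_nil cs i e (by
      have := pvGood_le cs tl e hgtl; omega)
    show w * pvALoop true (pvSeg cs i e) + pvSum cs e sw tl = 0
    rw [h0, ih e sw hgtl (by omega)]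
    simp [pvALoop]

theorem pvPop_spec (cs : List Char) (i : Nat) :
    ∀ (stack : List (Nat × Int)) (w : Int), pvGood cs i stack →
    pvGood cs i (pvPop i stack w).1 ∧
    pvSum cs i (pvPop i stack w).2 (pvPop i stack w).1 = pvSum cs i w stack ∧
    (∀ e sw st, (pvPop i stack w).1 = (e, sw) :: st → i < e) := by
  intro stack
  induction stack with
  | nil =>
    intro w hg
    exact ⟨hg, rfl, by intro e sw st h; simp [pvPop] at h⟩
  | cons hd tl ih =>
    obtain ⟨e, sw⟩ := hd
    intro w hg
    obtain ⟨hie, hwseg, hgtl⟩ := hg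
    rw [pvPop]
    by_cases he : e ≤ i
    · rw [if_pos he]
      have hei : e = i := le_antisymm he hie
      subst hei
      obtain ⟨ih1, ih2, ih3⟩ := ih sw hgtl
      refine ⟨ih1, ?_, ih3⟩
      rw [ih2]
      show pvSum cs e sw tl = w * pvALoop true (pvSeg cs e e) + pvSum cs e sw tl
      rw [pvSeg_nil cs e e (by omega)]
      simp [pvALoop]
    · rw [if_neg he]
      exact ⟨⟨hie, hwseg, hgtl⟩, rfl, by
        intro e' sw' st' h
        cases h
        omega⟩

theorem pvBLoop_true (cs : List Char) :
    ∀ (fuel i : Nat) (stack : List (Nat × Int)) (w total : Int),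
      cs.length - i ≤ fuel → pvGood cs i stack →
      pvBLoop cs true fuel i stack w total = total + pvSum cs i w stack := by
  intro fuel
  induction fuel with
  | zero =>
    intro i stack w total hf hg
    rw [pvBLoop, pvSum_done cs stack i w hg (by omega)]
    ring
  | succ fuel ih =>
    intro i stack w total hf hg
    rw [pvBLoop]
    by_cases hi : i < cs.length
    · rw [dif_pos hi]
      rcases hpop : pvPop i stack w with ⟨stack', w'⟩
      obtain ⟨hg', hsum', htop'⟩ := pvPop_spec cs i stack w hg
      rw [hpop] at hg' hsum' htop'
      simp only [] at hg' hsum' htop' ⊢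
      obtain ⟨hitop, htopn, hwseg⟩ := pvGood_top cs i stack' hg'
      obtain ⟨K, hK⟩ := pvSum_split cs stack'
      have hie : i < pvTop cs.length stack' := by
        cases stack' with
        | nil => simpa [pvTop] using hi
        | cons hd tl =>
          obtain ⟨e, sw⟩ := hd
          exact htop' e sw tl rfl
      by_cases hc : cs[i] = '('
      · rw [if_pos hc]
        obtain ⟨dj, chars, rep, hfc', hpm, hch, hdj, hfit, hwchunk, hwrest, hA⟩ :=
          pvHead_paren cs i (pvTop cs.length stack') hie htopn hc hwseg
        rw [hfc']
        simp only []
        rw [hpm]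
        simp only [if_pos]
        have hgood2 : pvGood cs (i + dj + 1)
            ((i + dj + 1 + chars.toNat, w') :: stack') := by
          refine ⟨by omega, hwchunk, ?_⟩
          show pvGood cs (i + dj + 1 + chars.toNat) stack'
          exact pvGood_replace cs i _ stack' hg' (by omega) hwrest
        rw [ih (i + dj + 1) _ (w' * rep) total (by omega) hgood2]
        show total + ((w' * rep) * pvALoop true (pvSeg cs (i+dj+1) (i+dj+1+chars.toNat))
              + pvSum cs (i+dj+1+chars.toNat) w' stack') = _
        rw [hK, ← hsum', hK, hA]
        ring
      · rw [if_neg hc]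
        obtain ⟨hwf2, hA⟩ := pvHead_char cs i (pvTop cs.length stack') hie htopn hc hwseg
        have hgood2 : pvGood cs (i + 1) stack' :=
          pvGood_replace cs i (i+1) stack' hg' (by omega) hwf2
        rw [ih (i + 1) stack' w' (total + w') (by omega) hgood2]
        rw [hK, ← hsum', hK, hA]
        ring
    · rw [dif_neg hi, pvSum_done cs stack i w hg (by omega)]
      ring

theorem pvBLoop_false (cs : List Char) :
    ∀ (fuel i : Nat) (total : Int),
      cs.length - i ≤ fuel → pvWf false (cs.drop i) = true →
      pvBLoop cs false fuel i [] 1 total = total + pvALoop false (cs.drop i) := by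
  intro fuel
  induction fuel with
  | zero =>
    intro i total hf hwf
    rw [pvBLoop, List.drop_eq_nil_of_le (by omega), pvALoop]
    ring
  | succ fuel ih =>
    intro i total hf hwf
    rw [pvBLoop]
    by_cases hi : i < cs.length
    · rw [dif_pos hi]
      have hdrop : cs.drop i = cs[i] :: cs.drop (i + 1) := List.drop_eq_getElem_cons hi
      show (if cs[i] = '(' then _ else _) = _
      by_cases hc : cs[i] = '('
      · rw [if_pos hc]
        rw [hdrop, pvWf, if_pos hc] at hwf
        cases hfc : pvFindClose (cs[i] :: cs.drop (i + 1)) with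
        | none => rw [hfc] at hwf; simp at hwf
        | some j =>
          rw [hfc] at hwf
          simp only [] at hwf
          cases hpm : pvParseMarker (((cs[i] :: cs.drop (i + 1)).take j).drop 1) with
          | none => rw [hpm] at hwf; simp at hwf
          | some cr =>
            obtain ⟨chars, rep⟩ := cr
            rw [hpm] at hwf
            simp only [Bool.and_eq_true, Bool.or_eq_true, Bool.not_eq_true',
              decide_eq_true_eq] at hwf
            have hch := hwf.1.1
            have hrest := hwf.2
            -- translate the content and the rest to absolute indices
            have hcontent : ((cs[i] :: cs.drop (i + 1)).take j).drop 1
                = (cs.take (i + j)).drop (i + 1) := by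
              rw [← hdrop, List.take_drop, List.drop_drop]
            have hresteq : (cs[i] :: cs.drop (i + 1)).drop (j + 1 + chars.toNat)
                = cs.drop (i + j + 1 + chars.toNat) := by
              rw [← hdrop, List.drop_drop]
              congr 1
              omega
            rw [hdrop, hfc]
            simp only []
            rw [← hcontent, hpm]
            simp only [if_neg (by simp : ¬ (false = true))]
            rw [ih (i + j + 1 + chars.toNat) (total + 1 * (chars * rep)) (by omega)
              (by rw [← hresteq]; exact hrest)]
            rw [pvALoop, if_pos hc, hfc]
            simp only []
            rw [hpm]
            simp only [if_neg (by simp : ¬ (false = true))]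
            rw [hresteq]
            ring
      · rw [if_neg hc]
        rw [hdrop, pvWf, if_neg hc] at hwf
        rw [ih (i + 1) (total + 1) (by omega) hwf]
        rw [hdrop, pvALoop, if_neg hc]
        ring
    · rw [dif_neg hi, List.drop_eq_nil_of_le (by omega), pvALoop]
      ring

-- ===== VERDICT (by name: the statement is the Claim_ definition above) =====
theorem uncompressed_length_spec : Claim_equal_uncompressed_length := by
  intro s recurse _ hpre
  show uncompressed_length s recurse = uncompressed_length_alt s recurse
  unfold uncompressed_length uncompressed_length_alt
  cases recurse with
  | false =>
    rw [pvBLoop_false s.toList s.toList.length 0 0 (by omega)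
      (by rw [List.drop_zero, ← pvWfF_eq_pvWf false s.toList.length s.toList (le_refl _)]
          exact hpre)]
    simp
  | true =>
    have hseg : pvSeg s.toList 0 s.toList.length = s.toList := by
      simp [pvSeg]
    have hg : pvGood s.toList 0 [] := ⟨Nat.zero_le _, by
      rw [hseg, ← pvWfF_eq_pvWf true s.toList.length s.toList (le_refl _)]
      exact hpre⟩
    rw [pvBLoop_true s.toList s.toList.length 0 [] 1 0 (by omega) hg]
    show _ = 0 + 1 * pvALoop true (pvSeg s.toList 0 s.toList.length)
    rw [hseg]
    ring
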